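-- pv_equiv track=rewrite | github.com/ulyssesorz/data-structures | oj/开放定址法.py | search
-- ===== SOURCE A (Python) =====
-- def search(table,num):
--     if num not in table:
--         return -1
--     index=num%len(table)
--     count=1
--     if table[index]==num:
--         pass
--     else:
--         j=0
--         while table[(index+j)%len(table)] != num:
--             j+=1
--             count+=1
--     return count
-- ===== SOURCE B (Python) =====
-- def search(table, num):
--     if num not in table:
--         return -1
--     n = len(table)
--     index = num % n
--     return min((i - index) % n for i, x in enumerate(table) if x == num) + 1
-- ===== Notes on version B (the rewrite author's own statement) =====
-- stated objective: simpler
-- what changed: Replaces the sequential early-stopping while-probe with a count accumulator by a single full scan that takes the minimum modular distance (i - index) % n over all positions holding num, returning it plus one.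
import Mathlib
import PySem

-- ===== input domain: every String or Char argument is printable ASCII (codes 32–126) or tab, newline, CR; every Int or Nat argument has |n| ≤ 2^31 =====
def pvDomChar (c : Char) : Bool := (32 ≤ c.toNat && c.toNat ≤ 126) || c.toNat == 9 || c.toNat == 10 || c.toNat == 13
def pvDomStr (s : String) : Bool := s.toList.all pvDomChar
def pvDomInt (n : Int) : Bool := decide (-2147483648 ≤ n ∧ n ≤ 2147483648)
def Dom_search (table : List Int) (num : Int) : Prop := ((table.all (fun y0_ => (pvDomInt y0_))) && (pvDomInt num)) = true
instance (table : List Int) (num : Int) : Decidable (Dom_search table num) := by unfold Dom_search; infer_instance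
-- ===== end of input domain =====

-- B replaces A's sequential while-probe with a full scan taking the minimum modular distance;
-- objective: simpler (no early-stopping loop state), same O(n) cost.

-- ===== PORT A =====
-- the while loop; fuel = table.length only makes the recursion total: when num ∈ table the
-- hit is found within table.length probes, so the fuel is never exhausted there.
def searchProbe (table : List Int) (num index : Int) : Nat → Int → Int → Int
  | 0, _, count => count
  | fuel + 1, j, count =>
    if PySem.List.pyGetD table (PySem.Int.mod (index + j) (table.length : Int)) 0 ≠ num then
      searchProbe table num index fuel (j + 1) (count + 1)
    else
      count

def search (table : List Int) (num : Int) : Int :=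
  if table.contains num = false then -1
  else
    let index := PySem.Int.mod num (table.length : Int)
    if PySem.List.pyGetD table index 0 == num then
      1
    else
      searchProbe table num index table.length 0 1

-- ===== PORT B =====
def search_alt (table : List Int) (num : Int) : Int :=
  if table.contains num = false then -1
  else
    let n : Int := table.length
    let index := PySem.Int.mod num n
    let offs := (PySem.List.enumerate table 0).filterMap
      (fun p => if p.2 == num then some (PySem.Int.mod (p.1 - index) n) else none)
    match PySem.List.min? offs (fun x => x) with
    | some m => m + 1
    | none => -1  -- unreachable: num ∈ table here, so offs ≠ []

-- ===== PRECONDITION & SPEC =====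
def Spec_search (table : List Int) (num : Int) (out : Int) : Prop := out = search_alt table num
instance (table : List Int) (num : Int) (out : Int) : Decidable (Spec_search table num out) := by unfold Spec_search; infer_instance

-- ===== CLAIM (what is proved, stated in full; the proofs are below) =====
def Claim_equal_search : Prop := ∀ (table : List Int) (num : Int), Dom_search table num → Spec_search table num (search table num)

-- ===== LEMMAS AND PROOFS =====

lemma mem_enumerate_iff (xs : List Int) :
    ∀ (s : Int) (p : Int × Int), p ∈ PySem.List.enumerate xs s ↔
      ∃ i : Nat, ∃ h : i < xs.length, p = (s + i, xs[i]) := by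
  induction xs with
  | nil => intro s p; simp [PySem.List.enumerate_nil]
  | cons x xs ih =>
    intro s p
    rw [PySem.List.enumerate_cons, List.mem_cons, ih]
    constructor
    · rintro (rfl | ⟨i, h, rfl⟩)
      · exact ⟨0, by simp, by simp⟩
      · exact ⟨i + 1, by simpa using h, by simp [Prod.ext_iff]; omega⟩
    · rintro ⟨i, h, rfl⟩
      cases i with
      | zero => left; simp
      | succ i => right; exact ⟨i, by simpa using h, by simp [Prod.ext_iff]; omega⟩

lemma probe_eq (table : List Int) (num idx d : Int)
    (hQ : PySem.List.pyGetD table (PySem.Int.mod (idx + d) (table.length : Int)) 0 = num) :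
    ∀ (fuel : Nat) (j count : Int), j ≤ d → d - j ≤ (fuel : Int) →
      (∀ k, j ≤ k → k < d →
        PySem.List.pyGetD table (PySem.Int.mod (idx + k) (table.length : Int)) 0 ≠ num) →
      searchProbe table num idx fuel j count = count + (d - j) := by
  intro fuel
  induction fuel with
  | zero =>
    intro j count hjd hfuel _
    have : j = d := by omega
    subst this
    simp [searchProbe]
  | succ fuel ih =>
    intro j count hjd hfuel hmin
    by_cases hj : j = d
    · subst hj
      simp [searchProbe, hQ]
    · have hjd' : j < d := lt_of_le_of_ne hjd hj
      have hne := hmin j le_rfl hjd'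
      rw [searchProbe, if_pos hne,
        ih (j + 1) (count + 1) (by omega) (by omega)
          (fun k hk1 hk2 => hmin k (by omega) hk2)]
      ring

-- characterisation of B's candidate list
lemma mem_offs_iff (table : List Int) (num idx : Int) (x : Int) :
    x ∈ (PySem.List.enumerate table 0).filterMap
      (fun p => if p.2 == num then some (PySem.Int.mod (p.1 - idx) (table.length : Int)) else none) ↔
    ∃ i : Nat, ∃ h : i < table.length, table[i] = num ∧
      x = PySem.Int.mod ((i : Int) - idx) (table.length : Int) := by
  rw [List.mem_filterMap]
  constructor
  · rintro ⟨p, hp, hf⟩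
    rcases (mem_enumerate_iff table 0 p).1 hp with ⟨i, h, rfl⟩
    by_cases hv : table[i] = num
    · exact ⟨i, h, hv, by simp [hv] at hf; omega⟩
    · simp [hv] at hf
  · rintro ⟨i, h, hv, rfl⟩
    exact ⟨((i : Int), table[i]), (mem_enumerate_iff table 0 _).2 ⟨i, h, by simp⟩, by simp [hv]⟩

-- a hit at probe offset k (0 ≤ k < n) yields the candidate value k in B's list
lemma emod_round_trip (idx k n : Int) (hk0 : 0 ≤ k) (hkn : k < n) :
    ((idx + k) % n - idx) % n = k := by
  conv_lhs => rw [Int.sub_emod, Int.emod_emod_of_dvd _ dvd_rfl, ← Int.sub_emod]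
  have h : idx + k - idx = k := by ring
  rw [h, Int.emod_eq_of_lt hk0 hkn]

-- the converse direction: probing at B's candidate offset lands back on position i
lemma emod_round_trip' (idx i n : Int) (hi0 : 0 ≤ i) (hin : i < n) :
    (idx + (i - idx) % n) % n = i := by
  conv_lhs => rw [Int.add_emod, Int.emod_emod_of_dvd _ dvd_rfl, ← Int.add_emod]
  have h : idx + (i - idx) = i := by ring
  rw [h, Int.emod_eq_of_lt hi0 hin]

theorem search_eq_alt (table : List Int) (num : Int) :
    search table num = search_alt table num := by
  by_cases hmem : num ∈ table
  · have hcont : table.contains num = true := by simpa using hmem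
    have hn : 0 < table.length := List.length_pos_of_mem hmem
    have hnI : 0 < (table.length : Int) := by exact_mod_cast hn
    simp only [search, search_alt, hcont, Bool.true_eq_false, if_false]
    set idx : Int := PySem.Int.mod num (table.length : Int) with hidxdef
    have hidxe : idx = num % (table.length : Int) := PySem.Int.mod_eq_emod_of_pos hnI
    have hidx0 : 0 ≤ idx := by rw [hidxe]; exact Int.emod_nonneg _ (by omega)
    have hidxn : idx < (table.length : Int) := by rw [hidxe]; exact Int.emod_lt_of_pos _ hnI
    -- B's candidate list is nonempty
    obtain ⟨iw, hiw, hvw⟩ := List.mem_iff_getElem.1 hmem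
    have hwmem : PySem.Int.mod ((iw : Int) - idx) (table.length : Int) ∈
        (PySem.List.enumerate table 0).filterMap
          (fun p => if p.2 == num then some (PySem.Int.mod (p.1 - idx) (table.length : Int)) else none) :=
      (mem_offs_iff table num idx _).2 ⟨iw, hiw, hvw, rfl⟩
    obtain ⟨m, hm⟩ : ∃ m, PySem.List.min?
        ((PySem.List.enumerate table 0).filterMap
          (fun p => if p.2 == num then some (PySem.Int.mod (p.1 - idx) (table.length : Int)) else none))
        (fun x => x) = some m := by
      rcases h : PySem.List.min?
        ((PySem.List.enumerate table 0).filterMap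
          (fun p => if p.2 == num then some (PySem.Int.mod (p.1 - idx) (table.length : Int)) else none))
        (fun x => x) with _ | m
      · exact absurd ((PySem.List.min?_eq_none_iff _ _).1 h ▸ hwmem) (List.not_mem_nil)
      · exact ⟨m, h⟩
    have hmmem := PySem.List.min?_mem hm
    have hmmin := PySem.List.min?_isMin hm
    obtain ⟨i0, hi0, hv0, hmeq⟩ := (mem_offs_iff table num idx m).1 hmmem
    have hmeq' : m = ((i0 : Int) - idx) % (table.length : Int) := by
      rw [hmeq]; exact PySem.Int.mod_eq_emod_of_pos hnI
    have hm0 : 0 ≤ m := by rw [hmeq']; exact Int.emod_nonneg _ (by omega)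
    have hmn : m < (table.length : Int) := by rw [hmeq']; exact Int.emod_lt_of_pos _ hnI
    -- A's probe hits num at offset m
    have hQ : PySem.List.pyGetD table (PySem.Int.mod (idx + m) (table.length : Int)) 0 = num := by
      have h1 : PySem.Int.mod (idx + m) (table.length : Int) = (i0 : Int) := by
        rw [PySem.Int.mod_eq_emod_of_pos hnI, hmeq']
        exact emod_round_trip' idx (i0 : Int) (table.length : Int)
          (Int.natCast_nonneg i0) (by exact_mod_cast hi0)
      rw [h1, PySem.List.pyGetD_natCast, List.getD_eq_getElem _ _ hi0, hv0]
    -- and misses num at every earlier offset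
    have hnohit : ∀ k, 0 ≤ k → k < m →
        PySem.List.pyGetD table (PySem.Int.mod (idx + k) (table.length : Int)) 0 ≠ num := by
      intro k hk0 hkm hhit
      have hpe : PySem.Int.mod (idx + k) (table.length : Int) = (idx + k) % (table.length : Int) :=
        PySem.Int.mod_eq_emod_of_pos hnI
      have hp0 : 0 ≤ (idx + k) % (table.length : Int) := Int.emod_nonneg _ (by omega)
      have hpn : (idx + k) % (table.length : Int) < (table.length : Int) := Int.emod_lt_of_pos _ hnI
      have hpN : ((idx + k) % (table.length : Int)).toNat < table.length := by omega
      have hval : table[((idx + k) % (table.length : Int)).toNat] = num := by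
        rw [hpe, PySem.List.pyGetD_eq_getElem table 0 hp0 hpn] at hhit
        exact hhit
      have hkmem : k ∈ (PySem.List.enumerate table 0).filterMap
          (fun p => if p.2 == num then some (PySem.Int.mod (p.1 - idx) (table.length : Int)) else none) := by
        refine (mem_offs_iff table num idx k).2 ⟨_, hpN, hval, ?_⟩
        rw [PySem.Int.mod_eq_emod_of_pos hnI]
        have hcast : ((((idx + k) % (table.length : Int)).toNat : Int)) =
            (idx + k) % (table.length : Int) := by omega
        rw [hcast, emod_round_trip idx k (table.length : Int) hk0 (by omega)]
      exact absurd (hmmin k hkmem) (by omega)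
    rw [hm]
    simp only [beq_iff_eq]
    split_ifs with hit0
    · -- table[index] == num : A returns 1, and the minimal offset m is 0
      have hQ0 : PySem.List.pyGetD table (PySem.Int.mod (idx + 0) (table.length : Int)) 0 = num := by
        have he : PySem.Int.mod (idx + 0) (table.length : Int) = idx := by
          rw [PySem.Int.mod_eq_emod_of_pos hnI, add_zero, Int.emod_eq_of_lt hidx0 hidxn]
        rw [he]; exact hit0
      have hm00 : m = 0 := by
        by_contra hne
        exact hnohit 0 le_rfl (by omega) hQ0
      omega
    · -- else branch: m > 0, the while loop runs m times
      have hm0' : 0 < m := by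
        rcases eq_or_lt_of_le hm0 with h0 | h0
        · exfalso
          apply hit0
          have he : PySem.Int.mod (idx + m) (table.length : Int) = idx := by
            rw [PySem.Int.mod_eq_emod_of_pos hnI, ← h0, add_zero,
              Int.emod_eq_of_lt hidx0 hidxn]
          rw [he] at hQ
          exact hQ
        · exact h0
      have hloop := probe_eq table num idx m hQ table.length 0 1 (by omega)
        (by omega) (fun k hk1 hk2 => hnohit k hk1 hk2)
      rw [hloop]
      ring
  · simp [search, search_alt, hmem]

-- ===== VERDICT (by name: the statement is the Claim_ definition above) =====
theorem search_spec : Claim_equal_search := by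
  intro table num _
  unfold Spec_search
  exact search_eq_alt table num
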